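-- pv_equiv track=rewrite | github.com/amiralpert/SmartReach | BizIntel/Modules/SystemUno/SEC/environment_builder.py | _identify_regulatory_themes
-- ===== SOURCE A (Python) =====
-- from typing import Dict, List, Optional, Tuple
--
-- def _identify_regulatory_themes(risk_themes: Dict) -> List[str]:
--     """Identify regulatory themes"""
--     regulatory_keywords = ['regulation', 'fda', 'compliance', 'government', 'approval']
--     themes = []
--
--     for theme, data in risk_themes.items():
--         if any(keyword in theme.lower() for keyword in regulatory_keywords):
--             if data['total_mentions'] > 3:
--                 themes.append(theme)
--
--     return sorted(themes, key=lambda x: risk_themes[x]['total_mentions'], reverse=True)[:5]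
-- ===== SOURCE B (Python) =====
-- def _identify_regulatory_themes(risk_themes):
--     """Identify regulatory themes (single pass keeping a bounded top-5 buffer)."""
--     regulatory_keywords = ['regulation', 'fda', 'compliance', 'government', 'approval']
--     top = []  # (mentions, theme) pairs, mentions descending, ties in arrival order, at most 5
--     for theme, data in risk_themes.items():
--         lowered = theme.lower()
--         if any(keyword in lowered for keyword in regulatory_keywords):
--             mentions = data['total_mentions']
--             if mentions > 3:
--                 top = _insert_top(top, mentions, theme)[:5]
--     return [theme for _, theme in top]
--
-- def _insert_top(top, mentions, theme):
--     if not top or top[0][0] < mentions: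
--         return [(mentions, theme)] + top
--     return top[:1] + _insert_top(top[1:], mentions, theme)
-- ===== Notes on version B (the rewrite author's own statement) =====
-- stated objective: alternative
-- what changed: B replaces A's collect-all-candidates, full stable reverse sort and [:5] slice by a single pass that maintains a bounded best-first buffer of at most 5 (mentions, theme) pairs via positional insertion and truncation, never sorting the candidate list and never re-looking themes up in the dict.
import Mathlib
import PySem

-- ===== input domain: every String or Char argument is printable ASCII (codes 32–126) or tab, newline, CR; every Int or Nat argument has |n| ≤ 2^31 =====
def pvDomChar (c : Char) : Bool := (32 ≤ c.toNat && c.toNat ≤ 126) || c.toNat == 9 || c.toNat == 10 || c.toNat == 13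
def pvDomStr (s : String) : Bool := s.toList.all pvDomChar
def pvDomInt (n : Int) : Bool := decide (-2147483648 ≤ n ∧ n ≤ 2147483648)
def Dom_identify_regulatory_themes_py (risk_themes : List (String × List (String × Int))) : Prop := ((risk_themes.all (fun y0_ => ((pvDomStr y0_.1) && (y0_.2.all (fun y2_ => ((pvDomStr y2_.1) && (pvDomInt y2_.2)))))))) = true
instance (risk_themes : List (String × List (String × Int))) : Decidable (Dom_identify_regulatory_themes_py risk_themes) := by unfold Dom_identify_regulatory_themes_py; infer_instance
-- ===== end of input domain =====

-- B replaces A's filter-then-full-sort-then-slice by one pass that maintains a bounded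
-- (≤ 5 entries) best-first insertion buffer: an alternative algorithm of similar cost.

-- ===== PORT A =====
def pvKeywords : List String := ["regulation", "fda", "compliance", "government", "approval"]

def pvMatches (theme : String) : Bool :=
  pvKeywords.any (fun keyword => PySem.Str.isIn keyword (PySem.Str.lower theme))

def identify_regulatory_themes_py (risk_themes : List (String × List (String × Int))) : List String :=
  let themes := risk_themes.foldl (fun acc td =>
    if pvMatches td.1 then
      if PySem.Dict.getD ⟨td.2⟩ "total_mentions" 0 > 3 then acc ++ [td.1] else acc
    else acc) []
  PySem.List.slice
    (PySem.List.sorted themes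
      (fun x => PySem.Dict.getD ⟨PySem.Dict.getD ⟨risk_themes⟩ x []⟩ "total_mentions" 0) true)
    none (some 5)

-- ===== PORT B =====
-- `_insert_top`: insert (mentions, theme) before the first entry with strictly fewer mentions
def pvInsertTop (top : List (Int × String)) (mentions : Int) (theme : String) : List (Int × String) :=
  match top with
  | [] => [(mentions, theme)]
  | y :: ys => if y.1 < mentions then (mentions, theme) :: y :: ys else y :: pvInsertTop ys mentions theme

def identify_regulatory_themes_py_alt (risk_themes : List (String × List (String × Int))) : List String :=
  let top := risk_themes.foldl (fun top td =>
    let lowered := PySem.Str.lower td.1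
    if pvKeywords.any (fun keyword => PySem.Str.isIn keyword lowered) then
      let mentions := PySem.Dict.getD ⟨td.2⟩ "total_mentions" 0
      if mentions > 3 then PySem.List.slice (pvInsertTop top mentions td.1) none (some 5) else top
    else top) []
  top.map (·.2)

-- ===== PRECONDITION & SPEC =====
-- Pre_ excludes (a) association lists with duplicate keys in the outer dict or an inner dict —
-- a Python dict cannot carry duplicate keys, so such lists denote no input A ever receives —
-- and (b) inputs where a data dict of a keyword-matching theme lacks the key "total_mentions",
-- on which A raises KeyError (and B, reading data['total_mentions'] too, raises as well).
def Pre_identify_regulatory_themes_py (risk_themes : List (String × List (String × Int))) : Prop :=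
  (risk_themes.map Prod.fst).Nodup ∧
  ∀ td ∈ risk_themes, (td.2.map Prod.fst).Nodup ∧
    (pvMatches td.1 = true → "total_mentions" ∈ td.2.map Prod.fst)
instance (risk_themes : List (String × List (String × Int))) : Decidable (Pre_identify_regulatory_themes_py risk_themes) := by unfold Pre_identify_regulatory_themes_py; infer_instance

def pvWitness_identify_regulatory_themes_py : (List (String × List (String × Int))) :=
  [("fda oversight", [("total_mentions", 10)]), ("weather", [])]

def Spec_identify_regulatory_themes_py (risk_themes : List (String × List (String × Int))) (out : List String) : Prop := out = identify_regulatory_themes_py_alt risk_themes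
instance (risk_themes : List (String × List (String × Int))) (out : List String) : Decidable (Spec_identify_regulatory_themes_py risk_themes out) := by unfold Spec_identify_regulatory_themes_py; infer_instance

-- ===== CLAIM (what is proved, stated in full; the proofs are below) =====
def Claim_equal_identify_regulatory_themes_py : Prop := ∀ (risk_themes : List (String × List (String × Int))), Dom_identify_regulatory_themes_py risk_themes → Pre_identify_regulatory_themes_py risk_themes → Spec_identify_regulatory_themes_py risk_themes (identify_regulatory_themes_py risk_themes)

-- ===== LEMMAS AND PROOFS =====

-- A's sort key: total mentions looked up through the full dict
def pvMu (risk_themes : List (String × List (String × Int))) (x : String) : Int :=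
  PySem.Dict.getD ⟨PySem.Dict.getD ⟨risk_themes⟩ x []⟩ "total_mentions" 0

def pvBef (risk_themes : List (String × List (String × Int))) (a b : String) : Bool :=
  decide (pvMu risk_themes b < pvMu risk_themes a)

-- the shared candidate condition (keyword match and more than 3 mentions, read off the entry)
def pvC (td : String × List (String × Int)) : Bool :=
  pvMatches td.1 && decide (PySem.Dict.getD ⟨td.2⟩ "total_mentions" 0 > 3)

-- A's filter-then-insertion-sort, fused into one fold
def pvGA (risk_themes : List (String × List (String × Int)))
    (s : List String) (td : String × List (String × Int)) : List String :=
  if pvC td then PySem.List.insertBy (pvBef risk_themes) td.1 s else s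

def pvTau (risk_themes : List (String × List (String × Int))) (n : String) : Int × String :=
  (pvMu risk_themes n, n)

theorem pv_take_insertBy {α : Type} (bef : α → α → Bool) (x : α) :
    ∀ (k : Nat) (s : List α),
      List.take k (PySem.List.insertBy bef x (List.take k s)) =
      List.take k (PySem.List.insertBy bef x s) := by
  intro k s
  induction s generalizing k with
  | nil => simp
  | cons y ys ih =>
    cases k with
    | zero => simp
    | succ j =>
      simp only [List.take_succ_cons, PySem.List.insertBy]
      by_cases h : bef x y = true
      · simp only [h, if_true, List.take_succ_cons]
        cases j with
        | zero => simp
        | succ i => simp [List.take_take]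
      · simp [h, ih j]

theorem pv_lookup_self (rt : List (String × List (String × Int)))
    (hnd : (rt.map Prod.fst).Nodup) :
    ∀ td ∈ rt, PySem.Dict.getD ⟨rt⟩ td.1 [] = td.2 := by
  induction rt with
  | nil => intro td h; simp at h
  | cons hd tl ih =>
    intro td hmem
    simp only [List.map_cons, List.nodup_cons] at hnd
    rcases List.mem_cons.mp hmem with h | h
    · subst h
      simp [PySem.Dict.getD, PySem.Dict.get?, List.find?]
    · have hne : ¬ (hd.1 == td.1) = true := by
        simp only [beq_iff_eq]
        intro he
        exact hnd.1 (he ▸ List.mem_map_of_mem h)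
      have := ih hnd.2 td h
      simpa [PySem.Dict.getD, PySem.Dict.get?, List.find?, hne] using this

theorem pv_insertTop_eq (rt : List (String × List (String × Int))) (x : String) :
    ∀ ns : List String,
      pvInsertTop (ns.map (pvTau rt)) (pvMu rt x) x =
      (PySem.List.insertBy (pvBef rt) x ns).map (pvTau rt) := by
  intro ns
  induction ns with
  | nil => simp [pvInsertTop, PySem.List.insertBy, pvTau]
  | cons y ys ih =>
    simp only [List.map_cons, pvInsertTop, PySem.List.insertBy, pvBef, pvTau]
    by_cases h : pvMu rt y < pvMu rt x
    · simp [pvTau, h]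
    · simp [pvTau, h, ih]

theorem pv_fuseA (rt : List (String × List (String × Int))) :
    ∀ (l : List (String × List (String × Int))) (acc : List String),
      (l.foldl (fun acc td => if pvC td then acc ++ [td.1] else acc) acc).foldl
          (fun s x => PySem.List.insertBy (pvBef rt) x s) [] =
      l.foldl (pvGA rt)
        (acc.foldl (fun s x => PySem.List.insertBy (pvBef rt) x s) []) := by
  intro l
  induction l with
  | nil => intro acc; simp
  | cons td tl ih =>
    intro acc
    simp only [List.foldl_cons]
    rw [ih]
    congr 1
    by_cases h : pvC td = true
    · simp [h, pvGA, List.foldl_append]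
    · simp [h, pvGA]

theorem pv_Binv (rt : List (String × List (String × Int))) :
    ∀ (l : List (String × List (String × Int))),
      (∀ td ∈ l, pvMatches td.1 = true → PySem.Dict.getD ⟨rt⟩ td.1 [] = td.2) →
      ∀ s : List String,
        l.foldl (fun top td =>
            let lowered := PySem.Str.lower td.1
            if pvKeywords.any (fun keyword => PySem.Str.isIn keyword lowered) then
              let mentions := PySem.Dict.getD ⟨td.2⟩ "total_mentions" 0
              if mentions > 3 then PySem.List.slice (pvInsertTop top mentions td.1) none (some 5) else top
            else top) ((List.take 5 s).map (pvTau rt)) =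
        (List.take 5 (l.foldl (pvGA rt) s)).map (pvTau rt) := by
  intro l
  induction l with
  | nil => intro _ s; simp
  | cons td tl ih =>
    intro hl s
    have htd := hl td (List.mem_cons_self ..)
    have htl : ∀ td' ∈ tl, pvMatches td'.1 = true → PySem.Dict.getD ⟨rt⟩ td'.1 [] = td'.2 :=
      fun td' h => hl td' (List.mem_cons_of_mem _ h)
    rw [List.foldl_cons, List.foldl_cons]
    by_cases hm : pvMatches td.1 = true
    · have hmu2 : pvMu rt td.1 = PySem.Dict.getD ⟨td.2⟩ "total_mentions" 0 := by
        simp [pvMu, htd hm]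
      by_cases hgt : PySem.Dict.getD ⟨td.2⟩ "total_mentions" 0 > 3
      · have hc : pvC td = true := by simp [pvC, hm, hgt]
        have hm' : (pvKeywords.any fun keyword =>
            PySem.Str.isIn keyword (PySem.Str.lower td.1)) = true := hm
        simp only [hm', if_true, hgt, if_true]
        have hst : PySem.List.slice
            (pvInsertTop ((List.take 5 s).map (pvTau rt)) (PySem.Dict.getD ⟨td.2⟩ "total_mentions" 0) td.1)
            none (some 5) = (List.take 5 (pvGA rt s td)).map (pvTau rt) := by
          rw [← hmu2, pv_insertTop_eq rt td.1 (List.take 5 s),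
            PySem.List.slice_to _ (by norm_num)]
          simp only [show ((5:Int)).toNat = 5 from rfl]
          rw [← List.map_take, pv_take_insertBy]
          simp [pvGA, hc]
        rw [hst]
        exact ih htl (pvGA rt s td)
      · have hc : pvC td = false := by simp [pvC, hgt]
        have hgA : pvGA rt s td = s := by simp [pvGA, hc]
        have hm' : (pvKeywords.any fun keyword =>
            PySem.Str.isIn keyword (PySem.Str.lower td.1)) = true := hm
        simp only [hm', if_true, hgt, if_false, hgA]
        exact ih htl s
    · have hc : pvC td = false := by simp [pvC, hm]
      have hgA : pvGA rt s td = s := by simp [pvGA, hc]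
      have hm' : ¬ (pvKeywords.any fun keyword =>
          PySem.Str.isIn keyword (PySem.Str.lower td.1)) = true := hm
      simp only [hm', hgA]
      exact ih htl s

-- ===== VERDICT (by name: the statement is the Claim_ definition above) =====
theorem identify_regulatory_themes_py_spec : Claim_equal_identify_regulatory_themes_py := by
  intro rt _ hpre
  unfold Spec_identify_regulatory_themes_py
  unfold identify_regulatory_themes_py identify_regulatory_themes_py_alt
  simp only []
  rw [PySem.List.sorted_rev_eq_foldl_insertBy, PySem.List.slice_to _ (by norm_num)]
  simp only [show ((5:Int)).toNat = 5 from rfl]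
  have hA : (rt.foldl (fun acc td =>
      if pvMatches td.1 then
        if PySem.Dict.getD ⟨td.2⟩ "total_mentions" 0 > 3 then acc ++ [td.1] else acc
      else acc) []) =
      rt.foldl (fun acc td => if pvC td then acc ++ [td.1] else acc) [] := by
    congr 1
    funext acc td
    by_cases hm : pvMatches td.1 = true
    · by_cases hgt : PySem.Dict.getD ⟨td.2⟩ "total_mentions" 0 > 3
      · simp [hm, hgt, pvC]
      · simp [hm, hgt, pvC]
    · simp [hm, pvC]
  rw [hA]
  rw [show (fun a b : String => decide
      (PySem.Dict.getD ⟨PySem.Dict.getD ⟨rt⟩ b []⟩ "total_mentions" 0 <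
       PySem.Dict.getD ⟨PySem.Dict.getD ⟨rt⟩ a []⟩ "total_mentions" 0)) = pvBef rt from rfl]
  rw [pv_fuseA rt rt []]
  have hB := pv_Binv rt rt
      (fun td h hm => pv_lookup_self rt hpre.1 td h) []
  simp only [List.take_nil, List.map_nil] at hB
  rw [hB]
  simp [Function.comp_def, pvTau]
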